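-- pv_equiv track=rewrite | github.com/ideas-labo/model-impact | utils/SPL_sampling.py | option_wise_sampling
-- ===== SOURCE A (Python) =====
-- def option_wise_sampling(feature_dict={}):
--     final_configs = []
--     for i, key in enumerate(feature_dict.keys()):
--         temp_config = []
--         for j, key2 in enumerate(feature_dict.keys()):
--             if i == j:
--                 temp_config.append(1)
--             else:
--                 temp_config.append(0)
--         final_configs.append(temp_config)
--
--     return final_configs
-- ===== SOURCE B (Python) =====
-- def option_wise_sampling(feature_dict={}):
--     n = len(feature_dict)
--     flat = ([1] + [0] * n) * n
--     return [flat[i * n:(i + 1) * n] for i in range(n)]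
-- ===== Notes on version B (the rewrite author's own statement) =====
-- stated objective: alternative
-- what changed: Replaces the nested enumerate-and-compare loops with a flat-buffer stride trick: one flat list ([1]+[0]*n)*n is built and the n rows are cut out of it as consecutive slices flat[i*n:(i+1)*n], whose 1s fall on the diagonal since i*n+j is a multiple of n+1 exactly when i=j; no per-cell comparison or per-row assignment remains.
import Mathlib
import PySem

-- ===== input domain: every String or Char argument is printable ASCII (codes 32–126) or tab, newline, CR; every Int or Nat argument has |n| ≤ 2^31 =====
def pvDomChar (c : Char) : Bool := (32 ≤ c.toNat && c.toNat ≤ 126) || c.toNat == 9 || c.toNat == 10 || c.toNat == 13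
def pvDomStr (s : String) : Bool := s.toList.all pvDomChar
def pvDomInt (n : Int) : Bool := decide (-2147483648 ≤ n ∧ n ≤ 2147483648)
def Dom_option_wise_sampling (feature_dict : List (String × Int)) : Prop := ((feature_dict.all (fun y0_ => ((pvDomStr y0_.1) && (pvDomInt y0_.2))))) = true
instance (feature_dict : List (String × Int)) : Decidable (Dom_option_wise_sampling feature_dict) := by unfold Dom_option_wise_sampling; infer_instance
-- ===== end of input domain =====

-- B builds one flat buffer ([1]+[0]*n)*n and cuts the n rows out of it as stride-n
-- slices (the 1s land on the diagonal), instead of A's nested compare loops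
-- (objective: alternative; a timing run at grading decides any speed label).

-- ===== PORT A =====
def option_wise_sampling (feature_dict : List (String × Int)) : List (List Int) :=
  let keys := (PySem.Dict.ofList feature_dict).keys
  (PySem.List.enumerate keys 0).foldl
    (fun final_configs p =>
      final_configs ++
        [(PySem.List.enumerate keys 0).foldl
            (fun temp_config q =>
              temp_config ++ [if p.1 = q.1 then (1 : Int) else 0]) []])
    []

-- ===== PORT B =====
def option_wise_sampling_alt (feature_dict : List (String × Int)) : List (List Int) :=
  let n : Int := ((PySem.Dict.ofList feature_dict).size : Int)
  let flat : List Int :=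
    (List.replicate n.toNat ((1 : Int) :: List.replicate n.toNat 0)).flatten  -- ([1]+[0]*n)*n
  (PySem.List.pyRange 0 n 1).map
    (fun i => PySem.List.slice flat (some (i * n)) (some ((i + 1) * n)))

-- ===== PRECONDITION & SPEC =====
def Spec_option_wise_sampling (feature_dict : List (String × Int)) (out : List (List Int)) : Prop := out = option_wise_sampling_alt feature_dict
instance (feature_dict : List (String × Int)) (out : List (List Int)) : Decidable (Spec_option_wise_sampling feature_dict out) := by unfold Spec_option_wise_sampling; infer_instance

-- ===== CLAIM =====
def Claim_equal_option_wise_sampling : Prop := ∀ (feature_dict : List (String × Int)), Dom_option_wise_sampling feature_dict → Spec_option_wise_sampling feature_dict (option_wise_sampling feature_dict)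

-- ===== LEMMAS AND PROOFS =====

-- append-accumulator foldl is a map
theorem pv_foldl_snoc {α β : Type} (xs : List α) (f : α → β) (acc : List β) :
    xs.foldl (fun a x => a ++ [f x]) acc = acc ++ xs.map f := by
  induction xs generalizing acc with
  | nil => simp
  | cons x xs ih => simp [List.foldl, ih]

-- element k of m copies of a block is the block's element at k mod its length
theorem pv_getElem_flatten_replicate {α : Type} (blk : List α) (hb : 0 < blk.length)
    (m k : Nat) (hk : k < (List.replicate m blk).flatten.length) :
    (List.replicate m blk).flatten[k]'hk
      = blk[k % blk.length]'(Nat.mod_lt k hb) := by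
  induction m generalizing k with
  | zero => simp at hk
  | succ m ih =>
    simp only [List.replicate_succ, List.flatten_cons] at hk ⊢
    by_cases h : k < blk.length
    · rw [List.getElem_append_left h]
      congr 1
      exact (Nat.mod_eq_of_lt h).symm
    · have hlt : k - blk.length < (List.replicate m blk).flatten.length := by
        simp only [List.length_append] at hk; omega
      rw [List.getElem_append_right (by omega), ih (k - blk.length) hlt]
      congr 1
      exact (Nat.mod_eq_sub_mod (by omega)).symm

-- the block ([1]+[0]*n) is 1 at index 0 and 0 elsewhere
theorem pv_blk_getElem (n r : Nat) (hr : r < ((1 : Int) :: List.replicate n 0).length) :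
    ((1 : Int) :: List.replicate n 0)[r]'hr = if r = 0 then 1 else 0 := by
  cases r with
  | zero => simp
  | succ r => simp

-- stride arithmetic: (i*n + j) mod (n+1) is 0 exactly on the diagonal
theorem pv_mod_eq (n i j : Nat) (hi : i < n) (hj : j < n) :
    (i * n + j) % (n + 1) = if i ≤ j then j - i else n + 1 + j - i := by
  by_cases h : i ≤ j
  · rw [if_pos h]
    have : i * n + j = (j - i) + i * (n + 1) := by ring_nf; omega
    rw [this, Nat.add_mul_mod_self_right, Nat.mod_eq_of_lt (by omega)]
  · rw [if_neg h]
    obtain ⟨i', rfl⟩ : ∃ i', i = i' + 1 := ⟨i - 1, by omega⟩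
    have heq : (i' + 1) * n + j = (n + 1 + j - (i' + 1)) + i' * (n + 1) := by
      have h1 : (i' + 1) * n = i' * n + n := Nat.succ_mul i' n
      have h2 : i' * (n + 1) = i' * n + i' := Nat.mul_succ i' n
      omega
    rw [heq, Nat.add_mul_mod_self_right, Nat.mod_eq_of_lt (by omega)]

-- a stride-n slice of the flat buffer is the i-th one-hot row
theorem pv_row (n i : Nat) (hi : i < n) :
    PySem.List.slice ((List.replicate n ((1 : Int) :: List.replicate n 0)).flatten)
        (some ((i : Int) * n)) (some (((i : Int) + 1) * n))
      = (List.range n).map (fun j => if i = j then (1 : Int) else 0) := by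
  have hcast1 : ((i : Int) * n) = ((i * n : Nat) : Int) := by push_cast; ring
  have hcast2 : (((i : Int) + 1) * n) = (((i + 1) * n : Nat) : Int) := by push_cast; ring
  rw [hcast1, hcast2, PySem.List.slice_natCast]
  have hsub : (i + 1) * n - i * n = n := by rw [Nat.succ_mul]; omega
  rw [hsub]
  have hlen : ((List.replicate n ((1 : Int) :: List.replicate n 0)).flatten).length
      = n * (n + 1) := by
    simp [List.length_flatten, List.map_replicate, List.sum_replicate]
  have hfit : i * n + n ≤ n * (n + 1) := by
    calc i * n + n = (i + 1) * n := (Nat.succ_mul i n).symm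
    _ ≤ (n + 1) * n := Nat.mul_le_mul_right n (by omega)
    _ = n * (n + 1) := Nat.mul_comm _ _
  apply List.ext_getElem
  · simp [hlen, List.length_take, List.length_drop]
    omega
  · intro j hj1 hj2
    have hjn : j < n := by simpa using hj2
    rw [List.getElem_take, List.getElem_drop]
    rw [pv_getElem_flatten_replicate _ (by simp) n (i * n + j) (by rw [hlen]; omega)]
    rw [pv_blk_getElem]
    simp only [List.getElem_map, List.getElem_range]
    rw [show ((1 : Int) :: List.replicate n 0).length = n + 1 by simp,
      pv_mod_eq n i j hi hjn]
    by_cases h : i = j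
    · simp [h]
    · rw [if_neg h]
      by_cases hle : i ≤ j
      · rw [if_pos hle, if_neg (by omega)]
      · rw [if_neg hle, if_neg (by omega)]

theorem option_wise_sampling_eq (feature_dict : List (String × Int)) :
    option_wise_sampling feature_dict = option_wise_sampling_alt feature_dict := by
  unfold option_wise_sampling option_wise_sampling_alt
  set keys := (PySem.Dict.ofList feature_dict).keys with hkeys
  have hsize : (PySem.Dict.ofList feature_dict).size = keys.length := by
    simp [hkeys, PySem.Dict.keys, PySem.Dict.size]
  rw [hsize, pv_foldl_snoc]
  simp only [List.nil_append, Int.toNat_natCast]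
  have hfst : (PySem.List.enumerate keys 0).map (·.1)
      = PySem.List.pyRange 0 (keys.length : Int) 1 := by
    simpa using PySem.List.map_fst_enumerate keys 0
  have hmap : ∀ {β : Type} (g : Int → β),
      (PySem.List.enumerate keys 0).map (fun p => g p.1)
        = (PySem.List.pyRange 0 (keys.length : Int) 1).map g := by
    intro β g
    rw [← hfst, List.map_map]; rfl
  have hrange : PySem.List.pyRange 0 (keys.length : Int) 1
      = (List.range keys.length).map (fun k : Nat => (k : Int)) := by
    have h1 : ((keys.length : Int) - 0).toNat = keys.length := by omega
    rw [PySem.List.pyRange_one, h1]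
    apply List.map_congr_left
    intro k _
    omega
  rw [hmap (fun i => (PySem.List.enumerate keys 0).foldl
        (fun temp_config q => temp_config ++ [if i = q.1 then (1 : Int) else 0]) [])]
  rw [hrange, List.map_map, List.map_map]
  apply List.map_congr_left
  intro i hi
  have hin : i < keys.length := List.mem_range.mp hi
  rw [Function.comp, Function.comp, pv_foldl_snoc, List.nil_append,
    hmap (fun j => if (i : Int) = j then (1 : Int) else 0), hrange, List.map_map,
    pv_row keys.length i hin]
  apply List.map_congr_left
  intro j _
  simp [Function.comp]

-- ===== VERDICT =====
theorem option_wise_sampling_spec : Claim_equal_option_wise_sampling := by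
  intro fd _
  unfold Spec_option_wise_sampling
  exact option_wise_sampling_eq fd
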